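-- pv_equiv track=rewrite | github.com/pypi-data/pypi-mirror-360 | packages/window-asset-tkinter/window_asset_tkinter-1.0.16.tar.gz/window_asset_tkinter-1.0.16/window_asset_tkinter/action_assets/md_to_micro_styler.py | replace_beginning_chr
-- ===== SOURCE A (Python) =====
-- def replace_beginning_chr(chr: str, string: str) -> str:
--     """ Replace the beginning character of a string """
--     result = ""
--     item_replaced = False
--     just_after_item = False
--
--     for item in string:
--         if item == chr and item_replaced == False:
--             just_after_item = True
--             result += ""
--         elif (item == " " or item == "\t") and just_after_item == True and item_replaced == False:
--             result += ""
--             item_replaced = True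
--         else:
--             result += item
--     return result
-- ===== SOURCE B (Python) =====
-- def replace_beginning_chr(chr: str, string: str) -> str:
--     # One scan finds the cut: the first space/tab that occurs after a character
--     # equal to chr has been seen; the prefix before the cut is filtered of chr
--     # characters, the remainder after the cut is kept verbatim.
--     cut = -1
--     seen = False
--     for i, c in enumerate(string):
--         if c == chr:
--             seen = True
--         elif (c == " " or c == "\t") and seen:
--             cut = i
--             break
--     if cut == -1:
--         return "".join(c for c in string if c != chr)
--     return "".join(c for c in string[:cut] if c != chr) + string[cut + 1:]
-- ===== Notes on version B (the rewrite author's own statement) =====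
-- stated objective: alternative
-- what changed: A simulates a two-flag state machine appending character by character; B first scans once to find the cut index (first space/tab after a chr occurrence), then builds the result as a filtered prefix plus a verbatim suffix slice.
import Mathlib
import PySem

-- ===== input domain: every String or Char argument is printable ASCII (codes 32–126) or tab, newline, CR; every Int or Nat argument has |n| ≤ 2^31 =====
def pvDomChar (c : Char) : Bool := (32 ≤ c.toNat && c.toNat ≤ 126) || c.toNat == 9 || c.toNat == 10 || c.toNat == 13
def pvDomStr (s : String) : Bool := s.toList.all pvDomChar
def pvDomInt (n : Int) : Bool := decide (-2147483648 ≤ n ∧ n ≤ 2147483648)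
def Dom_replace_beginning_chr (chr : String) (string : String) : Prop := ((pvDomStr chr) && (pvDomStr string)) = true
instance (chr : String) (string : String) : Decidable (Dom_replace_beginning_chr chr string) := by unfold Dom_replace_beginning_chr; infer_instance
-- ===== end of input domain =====

-- B replaces A's per-character two-flag state machine by a single scan for the cut
-- index followed by filter-prefix + verbatim-suffix; same cost, different decomposition.

-- ===== PORT A =====
-- state: (result, item_replaced, just_after_item); 'item == chr' compares the
-- 1-character string of item with chr, exactly as Python does.
def pvStepA (chr : String) (st : List Char × Bool × Bool) (item : Char) :
    List Char × Bool × Bool :=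
  match st with
  | (result, item_replaced, just_after_item) =>
    if String.ofList [item] == chr && !item_replaced then
      (result, item_replaced, true)
    else if (item == ' ' || item == '\t') && just_after_item && !item_replaced then
      (result, true, just_after_item)
    else
      (result ++ [item], item_replaced, just_after_item)

def replace_beginning_chr (chr : String) (string : String) : String :=
  String.ofList (string.toList.foldl (pvStepA chr) ([], false, false)).1

-- ===== PORT B =====
-- the break-ing scan of Source B: first space/tab index occurring after a chr character
def pvFindCut (chr : String) : List Char → Bool → Nat → Option Nat
  | [], _, _ => none
  | c :: cs, seen, i =>
    if String.ofList [c] == chr then pvFindCut chr cs true (i + 1)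
    else if (c == ' ' || c == '\t') && seen then some i
    else pvFindCut chr cs seen (i + 1)

def replace_beginning_chr_alt (chr : String) (string : String) : String :=
  match pvFindCut chr string.toList false 0 with
  | none => String.ofList (string.toList.filter (fun c => !(String.ofList [c] == chr)))
  | some cut =>
      String.ofList ((string.toList.take cut).filter (fun c => !(String.ofList [c] == chr)))
        ++ String.ofList (string.toList.drop (cut + 1))

-- ===== PRECONDITION & SPEC =====
def Spec_replace_beginning_chr (chr : String) (string : String) (out : String) : Prop := out = replace_beginning_chr_alt chr string
instance (chr : String) (string : String) (out : String) : Decidable (Spec_replace_beginning_chr chr string out) := by unfold Spec_replace_beginning_chr; infer_instance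

-- ===== CLAIM (what is proved, stated in full; the proofs are below) =====
def Claim_equal_replace_beginning_chr : Prop := ∀ (chr : String) (string : String), Dom_replace_beginning_chr chr string → Spec_replace_beginning_chr chr string (replace_beginning_chr chr string)

-- ===== LEMMAS AND PROOFS =====

-- the starting index of pvFindCut only shifts the answer
theorem pvFindCut_shift (chr : String) (l : List Char) (seen : Bool) (i : Nat) :
    pvFindCut chr l seen (i + 1) = (pvFindCut chr l seen i).map (· + 1) := by
  induction l generalizing seen i with
  | nil => simp [pvFindCut]
  | cons c cs ih =>
    simp only [pvFindCut]
    split_ifs with h1 h2 <;> simp [ih]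

-- once item_replaced is set, A's fold appends the rest verbatim
theorem pvFoldA_replaced (chr : String) (l : List Char) (r : List Char) (j : Bool) :
    l.foldl (pvStepA chr) (r, true, j) = (r ++ l, true, j) := by
  induction l generalizing r with
  | nil => simp
  | cons c cs ih =>
    rw [List.foldl_cons,
      show pvStepA chr (r, true, j) c = (r ++ [c], true, j) by simp [pvStepA]]
    simp [ih]

-- main invariant: A's fold from (r, false, seen) computes B's cut-based result
theorem pvFoldA_main (chr : String) (l : List Char) (r : List Char) (seen : Bool) :
    (l.foldl (pvStepA chr) (r, false, seen)).1 =
      match pvFindCut chr l seen 0 with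
      | none => r ++ l.filter (fun c => !(String.ofList [c] == chr))
      | some cut =>
          r ++ (l.take cut).filter (fun c => !(String.ofList [c] == chr)) ++ l.drop (cut + 1) := by
  induction l generalizing r seen with
  | nil => simp [pvFindCut]
  | cons c cs ih =>
    rw [List.foldl_cons]
    by_cases h1 : (String.ofList [c] == chr) = true
    · rw [show pvStepA chr (r, false, seen) c = (r, false, true) by simp [pvStepA, h1],
        show pvFindCut chr (c :: cs) seen 0 = (pvFindCut chr cs true 0).map (· + 1) by
          rw [pvFindCut, if_pos h1]; exact pvFindCut_shift chr cs true 0,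
        ih]
      cases hc : pvFindCut chr cs true 0 with
      | none => simp [h1]
      | some cut => simp [h1]
    · by_cases h2 : ((c == ' ' || c == '\t') && seen) = true
      · rw [show pvStepA chr (r, false, seen) c = (r, true, seen) by
            simp [pvStepA, h1, h2],
          show pvFindCut chr (c :: cs) seen 0 = some 0 by
            rw [pvFindCut, if_neg h1, if_pos h2],
          pvFoldA_replaced]
        simp
      · rw [show pvStepA chr (r, false, seen) c = (r ++ [c], false, seen) by
            simp [pvStepA, h1, h2],
          show pvFindCut chr (c :: cs) seen 0 = (pvFindCut chr cs seen 0).map (· + 1) by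
            rw [pvFindCut, if_neg h1, if_neg h2]; exact pvFindCut_shift chr cs seen 0,
          ih]
        cases hc : pvFindCut chr cs seen 0 with
        | none => simp [h1]
        | some cut => simp [h1]

-- ===== VERDICT (by name: the statement is the Claim_ definition above) =====
theorem replace_beginning_chr_spec : Claim_equal_replace_beginning_chr := by
  intro chr string _
  unfold Spec_replace_beginning_chr replace_beginning_chr replace_beginning_chr_alt
  rw [pvFoldA_main]
  cases hc : pvFindCut chr string.toList false 0 with
  | none => simp
  | some cut => simp [String.ofList_append]
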